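-- pv_equiv track=rewrite | github.com/Cizr/Distributed-Algorithms-Analysis | DISTRIBUTED ALGORITHMS/DistributedSystemMessenger/main.py | calculate_node_depth
-- ===== SOURCE A (Python) =====
-- def calculate_node_depth(topology):
--     """
--     Calculates the depth of each node in the given topology using depth-first search (DFS).
--
--     Args:
--         topology (dict): The topology represented as a dictionary of nodes and their neighbors.
--
--     Returns:
--         dict: A dictionary mapping each node to its depth in the topology.
--     """
--     node_depth = {}  #dict to store the depth of each node
--     visited = set()  #keep track of visited nodes
--
--     def dfs(node, depth):
--         """
--         Recursive function to perform depth-first search (DFS) traversal.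
--
--         Args:
--             node: The current node being visited.
--             depth: The depth of the current node in the traversal.
--
--         """
--         if node in visited:
--             return
--         visited.add(node)
--         node_depth[node] = depth
--         for neighbor in topology[node]:
--             dfs(neighbor, depth + 1)
--
--     #iterates over each node in each topology
--     for node in topology:
--         dfs(node, 0)
--
--     return node_depth  #dictionary mapping nodes to their depths
-- ===== SOURCE B (Python) =====
-- def calculate_node_depth(topology):
--     node_depth = {}
--     visited = set()
--     for start in topology:
--         stack = [(start, 0)]
--         while stack:
--             node, depth = stack.pop()
--             if node in visited:
--                 continue
--             visited.add(node)
--             node_depth[node] = depth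
--             for neighbor in reversed(topology[node]):
--                 stack.append((neighbor, depth + 1))
--     return node_depth
-- ===== Notes on version B (the rewrite author's own statement) =====
-- stated objective: alternative
-- what changed: The recursive DFS helper is replaced by an iterative DFS with an explicit stack of (node, depth) pairs, pushing neighbors in reversed order so the first-visit preorder (and hence every depth) is identical.
import Mathlib
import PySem

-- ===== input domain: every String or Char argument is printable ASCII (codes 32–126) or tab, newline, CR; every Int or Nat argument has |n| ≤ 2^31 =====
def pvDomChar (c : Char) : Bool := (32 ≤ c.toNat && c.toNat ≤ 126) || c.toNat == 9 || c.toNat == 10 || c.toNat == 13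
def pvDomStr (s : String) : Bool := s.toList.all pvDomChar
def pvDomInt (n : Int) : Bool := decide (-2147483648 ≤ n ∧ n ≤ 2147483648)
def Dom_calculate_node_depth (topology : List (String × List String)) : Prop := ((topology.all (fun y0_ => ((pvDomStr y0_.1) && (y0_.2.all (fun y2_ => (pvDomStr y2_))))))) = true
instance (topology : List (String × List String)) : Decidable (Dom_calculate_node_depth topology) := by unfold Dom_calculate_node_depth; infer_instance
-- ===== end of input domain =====

-- B replaces A's recursive DFS helper by an iterative DFS over an explicit (node, depth) stack,
-- pushing neighbors in reversed order, so first-visit depths are identical (objective: alternative).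

-- ===== PORT A =====

-- number of topology keys not yet in the visited set (termination measure for both ports)
def pvUnvis (topology : List (String × List String)) (v : PySem.Set String) : Nat :=
  ((topology.map Prod.fst).filter (fun k => !(PySem.Set.contains v k))).length

theorem pvFilter_add_le (v : PySem.Set String) (n : String) (l : List String) :
    (l.filter (fun k => !(PySem.Set.contains (PySem.Set.add v n) k))).length ≤
    (l.filter (fun k => !(PySem.Set.contains v k))).length := by
  apply List.Sublist.length_le
  apply List.monotone_filter_right
  intro a ha
  simp only [Bool.not_eq_eq_eq_not, Bool.not_true] at ha ⊢
  cases hva : PySem.Set.contains v a with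
  | false => rfl
  | true =>
    exfalso
    have : a ∈ PySem.Set.add v n := (PySem.Set.mem_add v n a).mpr (Or.inl ((PySem.Set.contains_iff v a).mp hva))
    rw [(PySem.Set.contains_iff _ a).mpr this] at ha
    simp at ha

theorem pvUnvis_add_le (t : List (String × List String)) (v : PySem.Set String) (n : String) :
    pvUnvis t (PySem.Set.add v n) ≤ pvUnvis t v :=
  pvFilter_add_le v n (t.map Prod.fst)

theorem pvUnvis_add_lt (topology : List (String × List String)) (v : PySem.Set String)
    (n : String) (hc : ¬ PySem.Set.contains v n = true) (hk : n ∈ topology.map Prod.fst) :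
    pvUnvis topology (PySem.Set.add v n) < pvUnvis topology v := by
  unfold pvUnvis
  have hmono := pvFilter_add_le v n
  have key : ∀ (l : List String), n ∈ l →
      (l.filter (fun k => !(PySem.Set.contains (PySem.Set.add v n) k))).length <
      (l.filter (fun k => !(PySem.Set.contains v k))).length := by
    intro l hl
    induction l with
    | nil => simp at hl
    | cons a l' ih =>
      by_cases han : a = n
      · subst han
        have h1 : PySem.Set.contains (PySem.Set.add v a) a = true :=
          (PySem.Set.contains_iff _ a).mpr ((PySem.Set.mem_add v a a).mpr (Or.inr rfl))
        have h2 : PySem.Set.contains v a = false := by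
          cases h : PySem.Set.contains v a with
          | false => rfl
          | true => exact absurd h hc
        simp only [List.filter_cons, h1, h2, Bool.not_true, Bool.not_false, if_true, if_false,
          Bool.false_eq_true, List.length_cons]
        have := hmono l'
        omega
      · have hl' : n ∈ l' := by
          rcases List.mem_cons.mp hl with h | h
          · exact absurd h.symm han
          · exact h
        have hsame : PySem.Set.contains (PySem.Set.add v n) a = PySem.Set.contains v a := by
          cases hva : PySem.Set.contains v a with
          | true =>
            exact (PySem.Set.contains_iff _ a).mpr ((PySem.Set.mem_add v n a).mpr (Or.inl ((PySem.Set.contains_iff v a).mp hva)))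
          | false =>
            cases hadd : PySem.Set.contains (PySem.Set.add v n) a with
            | false => rfl
            | true =>
              exfalso
              rcases (PySem.Set.mem_add v n a).mp ((PySem.Set.contains_iff _ a).mp hadd) with h | h
              · rw [(PySem.Set.contains_iff v a).mpr h] at hva; simp at hva
              · exact han h
        have ihh := ih hl'
        simp only [List.filter_cons, hsame]
        cases hva : PySem.Set.contains v a <;>
          simp only [Bool.not_true, Bool.not_false, Bool.false_eq_true, if_true, if_false, List.length_cons] <;> omega
  exact key _ hk

mutual
def pvDfsA (t : List (String × List String)) (node : String) (depth : Int)
    (σ : PySem.Set String × PySem.Dict String Int) :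
    Option {σ' : PySem.Set String × PySem.Dict String Int // pvUnvis t σ'.1 ≤ pvUnvis t σ.1} :=
  if hv : PySem.Set.contains σ.1 node = true then some ⟨σ, le_rfl⟩
  else
    match hf : t.find? (fun p => p.1 == node) with
    | none => none   -- KeyError in Python
    | some p =>
      match pvDfsAList t p.2 (depth + 1) (PySem.Set.add σ.1 node, PySem.Dict.insert σ.2 node depth) with
      | none => none
      | some ⟨σ', h'⟩ => some ⟨σ', le_trans h' (pvUnvis_add_le t σ.1 node)⟩
termination_by (pvUnvis t σ.1, 0)
decreasing_by
  exact Prod.Lex.left _ _ (pvUnvis_add_lt t σ.1 node hv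
    (List.mem_map.mpr ⟨p, List.mem_of_find?_eq_some hf, by
      have := List.find?_some hf; simpa using this⟩))

def pvDfsAList (t : List (String × List String)) (ns : List String) (depth : Int)
    (σ : PySem.Set String × PySem.Dict String Int) :
    Option {σ' : PySem.Set String × PySem.Dict String Int // pvUnvis t σ'.1 ≤ pvUnvis t σ.1} :=
  match ns with
  | [] => some ⟨σ, le_rfl⟩
  | m :: ms =>
    match pvDfsA t m depth σ with
    | none => none
    | some ⟨σ'', h''⟩ =>
      match pvDfsAList t ms depth σ'' with
      | none => none
      | some ⟨σ', h'⟩ => some ⟨σ', le_trans h' h''⟩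
termination_by (pvUnvis t σ.1, ns.length + 1)
decreasing_by
  · exact Prod.Lex.right _ (by simp only [List.length_cons]; omega)
  · rcases lt_or_eq_of_le h'' with h | h
    · exact Prod.Lex.left _ _ h
    · rw [h]; exact Prod.Lex.right _ (by simp only [List.length_cons]; omega)
end

def calculate_node_depth (topology : List (String × List String)) : List (String × Int) :=
  match (topology.map Prod.fst).foldl
      (fun acc node => match acc with
        | none => none
        | some σ => (pvDfsA topology node 0 σ).map (fun r => r.val))
      (some ((PySem.Set.empty : PySem.Set String), (PySem.Dict.empty : PySem.Dict String Int))) with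
  | none => []          -- unreachable under Pre_: Python raises KeyError there
  | some σ => σ.2.items

-- ===== PORT B =====
def pvStackLoop (t : List (String × List String)) (stack : List (String × Int))
    (σ : PySem.Set String × PySem.Dict String Int) :
    Option (PySem.Set String × PySem.Dict String Int) :=
  match stack with
  | [] => some σ
  | (n, d) :: rest =>
    if hv : PySem.Set.contains σ.1 n = true then pvStackLoop t rest σ
    else
      match hf : t.find? (fun p => p.1 == n) with
      | none => none   -- KeyError in Python
      | some p =>
        pvStackLoop t (p.2.reverse.foldl (fun s nb => (nb, d + 1) :: s) rest)
          (PySem.Set.add σ.1 n, PySem.Dict.insert σ.2 n d)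
termination_by (pvUnvis t σ.1, stack.length)
decreasing_by
  · exact Prod.Lex.right _ (by simp only [List.length_cons]; omega)
  · exact Prod.Lex.left _ _ (pvUnvis_add_lt t σ.1 n hv
      (List.mem_map.mpr ⟨p, List.mem_of_find?_eq_some hf, by
        have := List.find?_some hf; simpa using this⟩))

def calculate_node_depth_alt (topology : List (String × List String)) : List (String × Int) :=
  match (topology.map Prod.fst).foldl
      (fun acc node => match acc with
        | none => none
        | some σ => pvStackLoop topology [(node, 0)] σ)
      (some ((PySem.Set.empty : PySem.Set String), (PySem.Dict.empty : PySem.Dict String Int))) with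
  | none => []
  | some σ => σ.2.items

-- ===== PRECONDITION & SPEC =====
-- Pre_ excludes exactly the inputs on which the Python A raises KeyError: a neighbor that is not a topology key.
def Pre_calculate_node_depth (topology : List (String × List String)) : Prop :=
  ∀ p ∈ topology, ∀ n ∈ p.2, n ∈ topology.map Prod.fst
instance (topology : List (String × List String)) : Decidable (Pre_calculate_node_depth topology) := by
  unfold Pre_calculate_node_depth; infer_instance

def pvWitness_calculate_node_depth : (List (String × List String)) := [("a", ["b"]), ("b", [])]

def Spec_calculate_node_depth (topology : List (String × List String)) (out : List (String × Int)) : Prop := out = calculate_node_depth_alt topology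
instance (topology : List (String × List String)) (out : List (String × Int)) : Decidable (Spec_calculate_node_depth topology out) := by unfold Spec_calculate_node_depth; infer_instance

-- ===== CLAIM (what is proved, stated in full; the proofs are below) =====
def Claim_equal_calculate_node_depth : Prop := ∀ (topology : List (String × List String)), Dom_calculate_node_depth topology → Pre_calculate_node_depth topology → Spec_calculate_node_depth topology (calculate_node_depth topology)

-- ===== LEMMAS AND PROOFS =====

theorem pvPush_rev (ns : List String) (d : Int) (rest : List (String × Int)) :
    ns.reverse.foldl (fun s nb => (nb, d) :: s) rest = ns.map (fun m => (m, d)) ++ rest := by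
  induction ns generalizing rest with
  | nil => rfl
  | cons m ms ih =>
    simp only [List.reverse_cons, List.foldl_append, List.foldl_cons, List.foldl_nil, List.map_cons,
      List.cons_append]
    rw [ih]

theorem pvMain (t : List (String × List String)) (N : Nat) :
    (∀ σ, pvUnvis t σ.1 ≤ N → ∀ (n : String) (d : Int) rest,
        pvStackLoop t ((n, d) :: rest) σ =
          match pvDfsA t n d σ with
          | none => none
          | some r => pvStackLoop t rest r.val) ∧
    (∀ σ, pvUnvis t σ.1 ≤ N → ∀ (ns : List String) (d : Int) rest,
        pvStackLoop t (ns.map (fun m => (m, d)) ++ rest) σ =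
          match pvDfsAList t ns d σ with
          | none => none
          | some r => pvStackLoop t rest r.val) := by
  induction N using Nat.strong_induction_on with
  | _ N IH =>
    have h1 : ∀ σ, pvUnvis t σ.1 ≤ N → ∀ (n : String) (d : Int) rest,
        pvStackLoop t ((n, d) :: rest) σ =
          match pvDfsA t n d σ with
          | none => none
          | some r => pvStackLoop t rest r.val := by
      intro σ hσ n d rest
      by_cases hv : PySem.Set.contains σ.1 n = true
      · rw [pvStackLoop, pvDfsA, dif_pos hv]
        rw [dif_pos hv]
      · rw [pvStackLoop, pvDfsA, dif_neg hv]
        rw [dif_neg hv]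
        cases hfind : t.find? (fun p => p.1 == n) with
        | none => simp only [hfind]
        | some p =>
          simp only [hfind]
          have hmem : n ∈ t.map Prod.fst :=
            List.mem_map.mpr ⟨p, List.mem_of_find?_eq_some hfind, by
              have := List.find?_some hfind; simpa using this⟩
          have hlt : pvUnvis t (PySem.Set.add σ.1 n) < pvUnvis t σ.1 :=
            pvUnvis_add_lt t σ.1 n hv hmem
          rw [pvPush_rev]
          have hP2 := (IH (pvUnvis t (PySem.Set.add σ.1 n)) (lt_of_lt_of_le hlt hσ)).2
            (PySem.Set.add σ.1 n, PySem.Dict.insert σ.2 n d) le_rfl p.2 (d + 1) rest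
          rw [hP2]
          cases hL : pvDfsAList t p.2 (d + 1) (PySem.Set.add σ.1 n, PySem.Dict.insert σ.2 n d) with
          | none => simp [hL]
          | some r => obtain ⟨σ', h'⟩ := r; simp [hL]
    have h2 : ∀ (ns : List String) σ, pvUnvis t σ.1 ≤ N → ∀ (d : Int) rest,
        pvStackLoop t (ns.map (fun m => (m, d)) ++ rest) σ =
          match pvDfsAList t ns d σ with
          | none => none
          | some r => pvStackLoop t rest r.val := by
      intro ns
      induction ns with
      | nil =>
        intro σ hσ d rest
        simp [pvDfsAList]
      | cons m ms ihm =>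
        intro σ hσ d rest
        rw [List.map_cons, List.cons_append, h1 σ hσ m d _, pvDfsAList]
        cases hA : pvDfsA t m d σ with
        | none => simp [hA]
        | some r =>
          obtain ⟨σ'', h''⟩ := r
          simp only [hA]
          rw [ihm σ'' (le_trans h'' hσ) d rest]
          cases hL : pvDfsAList t ms d σ'' with
          | none => simp [hL]
          | some r' => obtain ⟨σ', h'⟩ := r'; simp [hL]
    exact ⟨h1, fun σ hσ ns => h2 ns σ hσ⟩

theorem pvStep_eq (t : List (String × List String))
    (acc : Option (PySem.Set String × PySem.Dict String Int)) (node : String) :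
    (match acc with
      | none => none
      | some σ => (pvDfsA t node 0 σ).map (fun r => r.val)) =
    (match acc with
      | none => none
      | some σ => pvStackLoop t [(node, 0)] σ) := by
  cases acc with
  | none => rfl
  | some σ =>
    have h := (pvMain t (pvUnvis t σ.1)).1 σ le_rfl node 0 []
    show (pvDfsA t node 0 σ).map (fun r => r.val) = pvStackLoop t [(node, 0)] σ
    rw [h]
    cases hA : pvDfsA t node 0 σ with
    | none => simp [hA]
    | some r => simp [hA, pvStackLoop]

theorem pvFold_eq (t : List (String × List String)) (l : List String)
    (acc : Option (PySem.Set String × PySem.Dict String Int)) :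
    l.foldl (fun acc node => match acc with
        | none => none
        | some σ => (pvDfsA t node 0 σ).map (fun r => r.val)) acc =
    l.foldl (fun acc node => match acc with
        | none => none
        | some σ => pvStackLoop t [(node, 0)] σ) acc := by
  induction l generalizing acc with
  | nil => rfl
  | cons x xs ih =>
    rw [List.foldl_cons, List.foldl_cons, pvStep_eq t acc x, ih]

-- ===== VERDICT (by name: the statement is the Claim_ definition above) =====
theorem calculate_node_depth_spec : Claim_equal_calculate_node_depth := by
  intro t _ _
  show calculate_node_depth t = calculate_node_depth_alt t
  unfold calculate_node_depth calculate_node_depth_alt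
  rw [pvFold_eq]
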